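-- pv_equiv track=rewrite | github.com/aliozen0/liderahenk-test-platform | platform/scripts/bootstrap_runtime.py | _group_by_service
-- ===== SOURCE A (Python) =====
-- from typing import Any
--
-- def _normalize_state(container: dict[str, Any]) -> str:
--     state = str(container.get("State") or "").lower()
--     status = str(container.get("Status") or "")
--     if state == "running":
--         return "running"
--     if state == "exited" and "Exited (0)" in status:
--         return "completed"
--     return state or "unknown"
--
-- def _group_by_service(containers: list[dict[str, Any]]) -> dict[str, list[dict[str, str]]]:
--     grouped: dict[str, list[dict[str, str]]] = {}
--     for container in containers:
--         service = str(container.get("Service") or "")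
--         if not service:
--             continue
--         grouped.setdefault(service, []).append(
--             {
--                 "state": _normalize_state(container),
--                 "health": str(container.get("Health") or "").lower(),
--             }
--         )
--     return grouped
-- ===== SOURCE B (Python) =====
-- from typing import Any
--
--
-- def _normalize_state(container: dict[str, Any]) -> str:
--     state = str(container.get("State") or "").lower()
--     status = str(container.get("Status") or "")
--     if state == "running":
--         return "running"
--     if state == "exited" and "Exited (0)" in status:
--         return "completed"
--     return state or "unknown"
--
--
-- def _group_by_service(containers: list[dict[str, Any]]) -> dict[str, list[dict[str, str]]]:
--     # One pass to tag every container with its service key, then a per-service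
--     # comprehension: first-occurrence key order, original within-group order.
--     entries = [
--         (
--             str(c.get("Service") or ""),
--             {
--                 "state": _normalize_state(c),
--                 "health": str(c.get("Health") or "").lower(),
--             },
--         )
--         for c in containers
--     ]
--     services: list[str] = []
--     for s, _ in entries:
--         if s and s not in services:
--             services.append(s)
--     return {s: [e for t, e in entries if t == s] for s in services}
-- ===== Notes on version B (the rewrite author's own statement) =====
-- stated objective: alternative
-- what changed: Replaced A's incremental setdefault-dict aggregation with a single tagging pass that pairs each container with its service key, a first-occurrence service list, and a per-service comprehension that collects each group's entries.
import Mathlib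
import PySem

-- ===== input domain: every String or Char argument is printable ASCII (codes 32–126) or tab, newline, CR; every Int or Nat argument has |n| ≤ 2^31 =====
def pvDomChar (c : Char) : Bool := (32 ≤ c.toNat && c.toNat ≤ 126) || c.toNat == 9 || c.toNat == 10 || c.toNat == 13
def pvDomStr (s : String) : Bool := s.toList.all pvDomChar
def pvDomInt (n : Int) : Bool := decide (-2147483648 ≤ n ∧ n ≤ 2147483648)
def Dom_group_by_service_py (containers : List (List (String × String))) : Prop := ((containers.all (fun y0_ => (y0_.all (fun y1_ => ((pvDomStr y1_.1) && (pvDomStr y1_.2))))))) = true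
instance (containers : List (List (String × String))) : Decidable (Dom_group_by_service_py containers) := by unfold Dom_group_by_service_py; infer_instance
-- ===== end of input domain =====

-- B replaces A's incremental setdefault-dict aggregation by one tagging pass plus a
-- first-occurrence service list and a per-service comprehension (objective: alternative decomposition).

-- ===== PORT A =====
-- container.get(k) or "" (values are strings, so falsy = "")
def pvGetD (c : List (String × String)) (k : String) : String :=
  (PySem.Dict.mk c).getD k ""

def pvNormalizeState (c : List (String × String)) : String :=
  let state := PySem.Str.lower (pvGetD c "State")
  let status := pvGetD c "Status"
  if state == "running" then "running"
  else if state == "exited" && PySem.Str.isIn "Exited (0)" status then "completed"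
  else if state == "" then "unknown" else state

-- the {"state": …, "health": …} dict appended for one container
def pvEntry (c : List (String × String)) : List (String × String) :=
  [("state", pvNormalizeState c), ("health", PySem.Str.lower (pvGetD c "Health"))]

def group_by_service_py (containers : List (List (String × String))) : List (String × List (List (String × String))) :=
  (containers.foldl
    (fun (grouped : PySem.Dict String (List (List (String × String)))) c =>
      let service := pvGetD c "Service"
      if service == "" then grouped
      else grouped.modify service [] (fun l => l ++ [pvEntry c]))
    PySem.Dict.empty).items

-- ===== PORT B =====
def group_by_service_py_alt (containers : List (List (String × String))) : List (String × List (List (String × String))) :=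
  let entries := containers.map (fun c => (pvGetD c "Service", pvEntry c))
  let services := entries.foldl
    (fun (ss : List String) p => if p.1 != "" && !ss.contains p.1 then ss ++ [p.1] else ss) []
  services.map (fun s => (s, (entries.filter (fun p => p.1 == s)).map (fun p => p.2)))

-- ===== PRECONDITION & SPEC =====
def Spec_group_by_service_py (containers : List (List (String × String))) (out : List (String × List (List (String × String)))) : Prop := out = group_by_service_py_alt containers
instance (containers : List (List (String × String))) (out : List (String × List (List (String × String)))) : Decidable (Spec_group_by_service_py containers out) := by unfold Spec_group_by_service_py; infer_instance

-- ===== CLAIM (what is proved, stated in full; the proofs are below) =====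
def Claim_equal_group_by_service_py : Prop := ∀ (containers : List (List (String × String))), Dom_group_by_service_py containers → Spec_group_by_service_py containers (group_by_service_py containers)

-- ===== LEMMAS AND PROOFS =====

-- A's loop body, restated over (service, entry) pairs
def pvStepA (g : PySem.Dict String (List (List (String × String))))
    (p : String × List (String × String)) : PySem.Dict String (List (List (String × String))) :=
  if p.1 == "" then g else g.modify p.1 [] (fun l => l ++ [p.2])

-- group values of B: entries for one service, in original order
def pvProj (ps : List (String × List (String × String))) (s : String) : List (List (String × String)) :=
  (ps.filter (fun p => p.1 == s)).map (fun p => p.2)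

-- B's grouping, restated over (service, entry) pairs
def pvGrp (ps : List (String × List (String × String))) : List (String × List (List (String × String))) :=
  (PySem.Set.ofList ((ps.map Prod.fst).filter (fun s => s != ""))).map (fun s => (s, pvProj ps s))

theorem pv_filter_map_pair {a b : Type} (xs : List a) (f : a -> b) (q : a -> Bool) :
    (xs.map (fun k => (k, f k))).filter (fun p => q p.1) = (xs.filter q).map (fun k => (k, f k)) := by
  induction xs with
  | nil => simp
  | cons x xs ih => by_cases h : q x <;> simp [h, ih]

theorem pv_svc_eq (ps : List (String × List (String × String))) :
    ps.foldl (fun (ss : List String) p => if p.1 != "" && !ss.contains p.1 then ss ++ [p.1] else ss) []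
      = PySem.Set.ofList ((ps.map Prod.fst).filter (fun s => s != "")) := by
  rw [PySem.Set.ofList_eq_foldl, List.foldl_filter, List.foldl_map]
  congr 1
  funext ss p
  cases h1 : (p.1 != "") <;> cases h2 : ss.contains p.1 <;>
    simp_all [PySem.Set.add, PySem.Set.contains_eq_listContains]

theorem pv_alt_eq_grp (containers : List (List (String × String))) :
    group_by_service_py_alt containers = pvGrp (containers.map (fun c => (pvGetD c "Service", pvEntry c))) := by
  show (((containers.map (fun c => (pvGetD c "Service", pvEntry c))).foldl
      (fun (ss : List String) p => if p.1 != "" && !ss.contains p.1 then ss ++ [p.1] else ss) []).map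
      (fun s => (s, ((containers.map (fun c => (pvGetD c "Service", pvEntry c))).filter
        (fun p => p.1 == s)).map (fun p => p.2)))) = _
  rw [pv_svc_eq]
  rfl

theorem pv_ofList_cons {x : String} {l : List String} :
    PySem.Set.ofList (x :: l) = x :: (PySem.Set.ofList l).filter (fun y => !(y == x)) := by
  rw [PySem.Set.ofList_eq_foldl, List.foldl_cons]
  have h1 : PySem.Set.add [] x = [x] := by
    simp [PySem.Set.add, PySem.Set.contains_eq_listContains]
  rw [h1]
  have h2 : List.foldl PySem.Set.add [x] l = PySem.Set.update [x] l := rfl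
  rw [h2, PySem.Set.update_eq_append_filter]
  have h3 : (fun (y : String) => !PySem.Set.contains [x] y) = (fun y => !(y == x)) := by
    funext y
    by_cases h : y = x <;> simp [h, PySem.Set.contains_eq_listContains]
  rw [h3]
  rfl

theorem pv_mem_svc {ps : List (String × List (String × String))} {k : String}
    (h : k ∈ PySem.Set.ofList ((ps.map Prod.fst).filter (fun s => s != ""))) : k ≠ "" := by
  rw [PySem.Set.mem_ofList] at h
  have := List.of_mem_filter h
  simpa using this

theorem pv_proj_cons_ne (p : String × List (String × String)) (ps : List (String × List (String × String)))
    {k : String} (h : p.1 ≠ k) : pvProj (p :: ps) k = pvProj ps k := by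
  unfold pvProj
  rw [List.filter_cons]
  simp [h]

theorem pv_proj_cons_eq (p : String × List (String × String)) (ps : List (String × List (String × String))) :
    pvProj (p :: ps) p.1 = p.2 :: pvProj ps p.1 := by
  unfold pvProj
  rw [List.filter_cons]
  simp

theorem pv_grp_cons_empty (e : List (String × String)) (ps : List (String × List (String × String))) :
    pvGrp (("", e) :: ps) = pvGrp ps := by
  unfold pvGrp
  simp only [List.map_cons, List.filter_cons]
  rw [if_neg (by simp)]
  apply List.map_congr_left
  intro k hk
  rw [pv_proj_cons_ne _ _ (by simpa using (pv_mem_svc hk).symm)]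

theorem pv_grp_cons (s : String) (e : List (String × String)) (ps : List (String × List (String × String)))
    (hs : s ≠ "") :
    pvGrp ((s, e) :: ps) = (s, e :: pvProj ps s) :: (pvGrp ps).filter (fun p => !(p.1 == s)) := by
  unfold pvGrp
  simp only [List.map_cons, List.filter_cons]
  rw [if_pos (by simpa using hs), pv_ofList_cons, List.map_cons]
  rw [pv_filter_map_pair (q := fun k => !(k == s))]
  congr 1
  · rw [pv_proj_cons_eq (p := (s, e))]
  · apply List.map_congr_left
    intro k hk
    have hk2 : k ≠ s := by simpa using (List.of_mem_filter hk)
    rw [pv_proj_cons_ne _ _ (fun h => hk2 h.symm)]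

-- the main invariant: folding A's step from dict g
theorem pv_main (ps : List (String × List (String × String))) :
    ∀ (g : PySem.Dict String (List (List (String × String)))),
      g.keys.Nodup → (∀ k ∈ g.keys, k ≠ "") →
      (ps.foldl pvStepA g).items
        = g.items.map (fun p => (p.1, p.2 ++ pvProj ps p.1))
            ++ (pvGrp ps).filter (fun p => !g.contains p.1) := by
  induction ps with
  | nil =>
    intro g _ _
    simp [pvGrp, pvProj]
  | cons hd tl ih =>
    intro g hnd hne
    obtain ⟨s, e⟩ := hd
    by_cases hs : s = ""
    · subst hs
      rw [List.foldl_cons]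
      have hstep : pvStepA g ("", e) = g := by simp [pvStepA]
      rw [hstep, ih g hnd hne, pv_grp_cons_empty]
      congr 1
      apply List.map_congr_left
      intro p hp
      have : p.1 ≠ "" := hne p.1 (PySem.Dict.mem_keys_of_mem_items g hp)
      rw [pv_proj_cons_ne _ _ (by simpa using this.symm)]
    · rw [List.foldl_cons]
      have hstep : pvStepA g (s, e) = g.insert s (g.getD s [] ++ [e]) := by
        simp [pvStepA, hs, PySem.Dict.modify]
      rw [hstep]
      by_cases hc : g.contains s = true
      · have hkeys : (g.insert s (g.getD s [] ++ [e])).keys = g.keys :=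
          PySem.Dict.keys_insert_of_contains g _ hc
        rw [ih _ (hkeys ▸ hnd) (fun k hk => hne k (hkeys ▸ hk))]
        rw [pv_grp_cons s e tl hs]
        rw [PySem.Dict.items_insert_of_contains g _ hc, List.map_map]
        congr 1
        · apply List.map_congr_left
          intro p hp
          by_cases hps : p.1 = s
          · have hget : g.get? p.1 = some p.2 := PySem.Dict.get?_of_mem_items g hp hnd
            have hgd : g.getD s [] = p.2 := by
              rw [← hps]; exact PySem.Dict.getD_of_get?_eq_some g [] hget
            simp [Function.comp, hps, hgd, pv_proj_cons_eq (p := (s, e))]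
          · simp only [Function.comp]
            rw [if_neg (by simpa using hps)]
            rw [pv_proj_cons_ne _ _ (fun h => hps h.symm)]
        · rw [List.filter_cons, if_neg (by simp [hc]), List.filter_filter]
          apply List.filter_congr
          intro p _
          rw [PySem.Dict.contains_insert]
          by_cases hps : p.1 = s
          · simp [hps, hc]
          · simp [Bool.and_comm]
      · have hc2 : g.contains s = false := by simpa using hc
        have hkeys : (g.insert s (g.getD s [] ++ [e])).keys = g.keys ++ [s] :=
          PySem.Dict.keys_insert_of_not_contains g _ hc2
        have hsnotmem : s ∉ g.keys := fun h => hc ((PySem.Dict.contains_iff_mem_keys g s).mpr h)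
        have hnd2 : (g.insert s (g.getD s [] ++ [e])).keys.Nodup := by
          rw [hkeys]
          simp [List.nodup_append, hnd]
          exact fun a ha h => hsnotmem (h ▸ ha)
        have hne2 : ∀ k ∈ (g.insert s (g.getD s [] ++ [e])).keys, k ≠ "" := by
          intro k hk
          rw [hkeys] at hk
          rcases List.mem_append.mp hk with h | h
          · exact hne k h
          · simpa using (List.mem_singleton.mp h) ▸ hs
        rw [ih _ hnd2 hne2]
        rw [PySem.Dict.items_insert_of_not_contains g _ hc2]
        rw [PySem.Dict.getD_of_not_contains g _ hc2]
        rw [pv_grp_cons s e tl hs, List.map_append, List.append_assoc]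
        congr 1
        · apply List.map_congr_left
          intro p hp
          have hpk : p.1 ∈ g.keys := PySem.Dict.mem_keys_of_mem_items g hp
          have hps : p.1 ≠ s := fun h => hsnotmem (h ▸ hpk)
          rw [pv_proj_cons_ne _ _ (fun h => hps h.symm)]
        · rw [List.filter_cons, if_pos (by simp [hc2]), List.filter_filter]
          simp only [List.map_cons, List.map_nil, List.nil_append, List.singleton_append]
          congr 1
          apply List.filter_congr
          intro p _
          rw [PySem.Dict.contains_insert]
          by_cases hps : p.1 = s
          · simp [hps, hc2]
          · simp [Bool.and_comm]

-- ===== VERDICT (by name: the statement is the Claim_ definition above) =====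
theorem group_by_service_py_spec : Claim_equal_group_by_service_py := by
  intro containers _
  unfold Spec_group_by_service_py
  rw [pv_alt_eq_grp]
  show (List.foldl (fun g c => pvStepA g (pvGetD c "Service", pvEntry c)) PySem.Dict.empty containers).items = _
  rw [← List.foldl_map (f := fun c => (pvGetD c "Service", pvEntry c)) (g := pvStepA)]
  rw [pv_main _ PySem.Dict.empty PySem.Dict.nodup_keys_empty (by simp [PySem.Dict.keys_empty])]
  have h0 : (PySem.Dict.empty : PySem.Dict String (List (List (String × String)))).items = [] := rfl
  simp [h0, PySem.Dict.contains_empty]
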